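-- pv_equiv track=rewrite | github.com/Ryushi-tech/card3 | tools/01-BFS_ARC084D.py | bin_bfs
-- ===== SOURCE A (Python) =====
-- def bin_bfs(mod):
--     from collections import deque
--     que = deque([(1, 1)])
--     seen = set()
--     while que:
--         c, x = que.popleft()
--         if not x:
--             return c
--         if x in seen:
--             continue
--         seen.add(x)
--         que.appendleft((c, x * 10 % mod))
--         que.append((c + 1, (x + 1) % mod))
-- ===== SOURCE B (Python) =====
-- def bin_bfs(mod):
--     # arena-FIFO BFS: the list only ever grows, i is the read pointer; the
--     # zero-cost times-ten chain from each popped residue is followed inline, and only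
--     # the unit-cost +1 successors are enqueued.
--     fifo = [(1, 1)]
--     i = 0
--     seen = set()
--     while i < len(fifo):
--         c, y = fifo[i]
--         i += 1
--         while True:
--             if y == 0:
--                 return c
--             if y in seen:
--                 break
--             seen.add(y)
--             fifo.append((c + 1, (y + 1) % mod))
--             y = y * 10 % mod
-- ===== Notes on version B (the rewrite author's own statement) =====
-- stated objective: alternative
-- what changed: Replaces the zero-one deque BFS (front-push for the free times-ten edge, back-push for the plus-one edge) by a grow-only arena FIFO with a read pointer whose inner loop follows each zero-cost times-ten chain inline, enqueueing only the unit-cost plus-one successors; the deque and its front-pushes disappear.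
-- outside the precondition, e.g. on bin_bfs(0): A raises ZeroDivisionError, B raises ZeroDivisionError
import Mathlib
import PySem

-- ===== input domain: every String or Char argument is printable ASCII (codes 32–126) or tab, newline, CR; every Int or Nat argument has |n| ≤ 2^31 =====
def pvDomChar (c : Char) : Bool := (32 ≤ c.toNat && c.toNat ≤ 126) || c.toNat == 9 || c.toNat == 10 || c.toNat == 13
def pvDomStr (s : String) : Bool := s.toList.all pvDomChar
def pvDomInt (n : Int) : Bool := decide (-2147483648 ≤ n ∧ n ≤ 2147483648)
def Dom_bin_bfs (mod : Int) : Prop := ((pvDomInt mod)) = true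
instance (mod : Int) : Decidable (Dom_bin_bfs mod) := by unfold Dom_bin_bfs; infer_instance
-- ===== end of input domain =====

-- B replaces A's zero-one deque (front-push for the free times-ten edge) by a grow-only FIFO
-- whose inner loop follows each zero-cost times-ten chain inline; same value, objective: alternative.

-- ===== PORT A =====
-- A's while-loop, fueled (one fuel unit per popleft); none = fuel exhausted or queue empty
def binLoopA (mod : Int) : Nat → List (Int × Int) → PySem.Set Int → Option Int
  | 0, _, _ => none
  | _ + 1, [], _ => none
  | f + 1, (c, x) :: que, seen =>
    if x = 0 then some c
    else if PySem.Set.contains seen x then binLoopA mod f que seen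
    else binLoopA mod f
      ((c, PySem.Int.mod (x * 10) mod) :: (que ++ [(c + 1, PySem.Int.mod (x + 1) mod)]))
      (PySem.Set.add seen x)

def bin_bfs (mod : Int) : Int :=
  (binLoopA mod (4 * mod.natAbs + 16) [(1, 1)] PySem.Set.empty).getD 0

-- ===== PORT B =====
-- B's inner `while True` chain loop (one fuel unit per iteration); returns the answer
-- `.inl c`, or `.inr` with the leftover fuel, the extended fifo and the seen set
def binChainB (mod : Int) : Nat → Int → Int → List (Int × Int) → PySem.Set Int →
    Option (Int ⊕ (Nat × List (Int × Int) × PySem.Set Int))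
  | 0, _, _, _, _ => none
  | f + 1, c, y, fifo, seen =>
    if y = 0 then some (.inl c)
    else if PySem.Set.contains seen y then some (.inr (f, fifo, seen))
    else binChainB mod f c (PySem.Int.mod (y * 10) mod)
      (fifo ++ [(c + 1, PySem.Int.mod (y + 1) mod)]) (PySem.Set.add seen y)

-- B's outer while-loop over the arena fifo (read pointer = dropping the head);
-- the first Nat is an outer-iteration bound, the second the threaded chain fuel
def binLoopB (mod : Int) : Nat → Nat → List (Int × Int) → PySem.Set Int → Option Int
  | 0, _, _, _ => none
  | _ + 1, _, [], _ => none
  | fo + 1, fi, (c, y) :: rest, seen =>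
    match binChainB mod fi c y rest seen with
    | none => none
    | some (.inl a) => some a
    | some (.inr (f', fifo', seen')) => binLoopB mod fo f' fifo' seen'

def bin_bfs_alt (mod : Int) : Int :=
  (binLoopB mod (4 * mod.natAbs + 16) (4 * mod.natAbs + 16) [(1, 1)] PySem.Set.empty).getD 0

-- ===== PRECONDITION & SPEC =====
-- Pre_ excludes only mod = 0, on which Python A (and B) raise ZeroDivisionError
def Pre_bin_bfs (mod : Int) : Prop := mod ≠ 0
instance (mod : Int) : Decidable (Pre_bin_bfs mod) := by unfold Pre_bin_bfs; infer_instance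
def pvWitness_bin_bfs : Int := (7)
def Spec_bin_bfs (mod : Int) (out : Int) : Prop := out = bin_bfs_alt mod
instance (mod : Int) (out : Int) : Decidable (Spec_bin_bfs mod out) := by unfold Spec_bin_bfs; infer_instance

-- ===== CLAIM (what is proved, stated in full; the proofs are below) =====
def Claim_equal_bin_bfs : Prop := ∀ (mod : Int), Dom_bin_bfs mod → Pre_bin_bfs mod → Spec_bin_bfs mod (bin_bfs mod)

-- ===== LEMMAS AND PROOFS =====

-- the chain consumes at least one fuel unit before handing control back
theorem binChainB_inr_lt (mod : Int) (f : Nat) (c y : Int) (fifo : List (Int × Int))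
    (seen : PySem.Set Int) (f' : Nat) (fifo' : List (Int × Int)) (seen' : PySem.Set Int)
    (h : binChainB mod f c y fifo seen = some (.inr (f', fifo', seen'))) : f' < f := by
  induction f generalizing y fifo seen with
  | zero => simp [binChainB] at h
  | succ f ih =>
    rw [binChainB] at h
    split_ifs at h with h0 hs
    · simp at h
    · simp at h
      omega
    · exact Nat.lt_succ_of_lt (ih _ _ _ h)

-- one chain of B simulates A's consecutive front-pushed pops, fuel for fuel
theorem chain_sim (mod : Int) (f : Nat) (c y : Int) (fifo : List (Int × Int))
    (seen : PySem.Set Int) :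
    binLoopA mod f ((c, y) :: fifo) seen =
      match binChainB mod f c y fifo seen with
      | none => none
      | some (.inl a) => some a
      | some (.inr (f', fifo', seen')) => binLoopA mod f' fifo' seen' := by
  induction f generalizing y fifo seen with
  | zero => simp [binLoopA, binChainB]
  | succ f ih =>
    rw [binLoopA, binChainB]
    split_ifs with h0 hs
    · rfl
    · rfl
    · exact ih _ _ _

theorem binLoopA_zero (mod : Int) (fifo : List (Int × Int)) (seen : PySem.Set Int) :
    binLoopA mod 0 fifo seen = none := rfl

theorem binLoopA_nil (mod : Int) (f : Nat) (seen : PySem.Set Int) :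
    binLoopA mod f [] seen = none := by
  cases f <;> rfl

theorem loop_sim (mod : Int) (fo : Nat) : ∀ (fi : Nat), fi ≤ fo →
    ∀ (fifo : List (Int × Int)) (seen : PySem.Set Int),
    binLoopB mod fo fi fifo seen = binLoopA mod fi fifo seen := by
  induction fo with
  | zero =>
    intro fi hfi fifo seen
    interval_cases fi
    rw [binLoopB, binLoopA_zero]
  | succ fo ih =>
    intro fi hfi fifo seen
    match fifo with
    | [] => rw [binLoopB, binLoopA_nil]
    | (c, y) :: rest =>
      rw [binLoopB, chain_sim]
      cases h : binChainB mod fi c y rest seen with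
      | none => rfl
      | some v =>
        cases v with
        | inl a => rfl
        | inr s =>
          obtain ⟨f', fifo', seen'⟩ := s
          have hlt := binChainB_inr_lt mod fi c y rest seen f' fifo' seen' h
          exact ih f' (by omega) fifo' seen'

-- ===== VERDICT (by name: the statement is the Claim_ definition above) =====
theorem bin_bfs_spec : Claim_equal_bin_bfs := by
  intro mod _ _
  unfold Spec_bin_bfs bin_bfs bin_bfs_alt
  rw [loop_sim mod _ _ (Nat.le_refl _)]
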